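-- pv_equiv track=rewrite | github.com/martinandersen3d/MagicSnippet | src/searchAlgo.test.py | search_algo
-- ===== SOURCE A (Python) =====
-- def search_algo(a: str, b: str):
--     a_len = len(a)
--     allow_spellmistake = False
--
--     if a_len >= 3:
--         allow_spellmistake = True
--
--     counter = 0
--     spellmistakes = 0
--     # c = character
--     for c in a:
--         index = b.find(c, counter)
--         if index != -1:
--             counter = index+1
--         elif allow_spellmistake and spellmistakes == 0:
--             spellmistakes = 1
--         else:
--             return False
--     return True
-- ===== SOURCE B (Python) =====
-- def search_algo(a: str, b: str):
--     # Staged b-scanning greedy: one pass over b advancing a pointer into a;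
--     # if the pointer stalls, skip that character of a (when len(a) >= 3) and
--     # run a second pass over the remaining part of b.
--     def scan(sub, seg):
--         # Greedily match sub against seg by iterating over seg.
--         # Returns (#chars of sub matched, seg-index just after the last match).
--         p = 0
--         last = 0
--         for i, ch in enumerate(seg):
--             if p < len(sub) and ch == sub[p]:
--                 p += 1
--                 last = i + 1
--         return p, last
--
--     p, last = scan(a, b)
--     if p == len(a):
--         return True
--     if len(a) < 3:
--         return False
--     p2, _ = scan(a[p + 1:], b[last:])
--     return p2 == len(a) - p - 1
-- ===== Notes on version B (the rewrite author's own statement) =====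
-- stated objective: alternative
-- what changed: B inverts the traversal: instead of A's single loop over a with a mistake flag calling b.find repeatedly, B scans b once advancing a pointer into a (greedy subsequence by iterating over b) and, if the pointer stalls, skips the stalled character of a and runs one second scan over the remaining part of b.
import Mathlib
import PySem

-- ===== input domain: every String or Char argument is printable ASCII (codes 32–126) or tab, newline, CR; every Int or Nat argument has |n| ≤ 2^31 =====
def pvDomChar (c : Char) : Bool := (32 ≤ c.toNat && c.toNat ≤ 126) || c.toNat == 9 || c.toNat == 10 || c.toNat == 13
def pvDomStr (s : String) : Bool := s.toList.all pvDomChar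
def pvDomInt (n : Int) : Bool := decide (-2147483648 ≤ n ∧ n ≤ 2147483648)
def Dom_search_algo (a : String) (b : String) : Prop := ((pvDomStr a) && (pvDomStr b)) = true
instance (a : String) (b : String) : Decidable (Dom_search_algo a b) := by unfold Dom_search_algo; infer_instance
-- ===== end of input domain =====

-- B replaces A's single loop over a (repeated b.find with a mistake flag) by staged scans
-- over b: one pass over b advancing a pointer into a, and, if that stalls, one second pass
-- over the rest of b after skipping the stalled character (objective: alternative).

-- ===== PORT A =====
-- A's for-loop over a with early 'return False'; state (counter, spellmistakes)
def search_algo_go (b : String) (allow : Bool) : List Char → Int → Int → Bool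
  | [], _, _ => true
  | c :: rest, counter, sm =>
    let index := PySem.Str.findFrom b (String.ofList [c]) counter
    if index ≠ -1 then search_algo_go b allow rest (index + 1) sm
    else if allow && sm == 0 then search_algo_go b allow rest counter 1
    else false

def search_algo (a : String) (b : String) : Bool :=
  let a_len := PySem.Str.len a
  let allow_spellmistake := if a_len ≥ 3 then true else false
  search_algo_go b allow_spellmistake a.toList 0 0

-- ===== PORT B =====
-- Source B's scan(sub, seg): iterate over seg with index i, state (p, last);
-- Python's 'p < len(sub) and ch == sub[p]' is exactly 'sub[p]? = some ch'
def alt_scan_go (sub : List Char) : List Char → Nat → Nat → Nat → Nat × Nat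
  | [], _, p, last => (p, last)
  | ch :: rest, i, p, last =>
    if sub[p]? == some ch then alt_scan_go sub rest (i + 1) (p + 1) (i + 1)
    else alt_scan_go sub rest (i + 1) p last

def search_algo_alt (a : String) (b : String) : Bool :=
  let r := alt_scan_go a.toList b.toList 0 0 0
  if r.1 = a.toList.length then true
  else if a.toList.length < 3 then false
  else
    let r2 := alt_scan_go (a.toList.drop (r.1 + 1)) (b.toList.drop r.2) 0 0 0
    r2.1 == a.toList.length - r.1 - 1

-- ===== PRECONDITION & SPEC =====
def Spec_search_algo (a : String) (b : String) (out : Bool) : Prop := out = search_algo_alt a b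
instance (a : String) (b : String) (out : Bool) : Decidable (Spec_search_algo a b out) := by unfold Spec_search_algo; infer_instance

-- ===== CLAIM (what is proved, stated in full; the proofs are below) =====
def Claim_equal_search_algo : Prop := ∀ (a : String) (b : String), Dom_search_algo a b → Spec_search_algo a b (search_algo a b)

-- ===== LEMMAS AND PROOFS =====

-- reference greedy matcher (find-based, proof-only): returns (#matched, index after last match)
def greedyF : List Char → List Char → Nat → Nat → Nat × Nat
  | [], _, _, last => (0, last)
  | c :: cs, seg, i, last =>
    match seg.findIdx? (· == c) with
    | none => (0, last)
    | some k =>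
      let r := greedyF cs (seg.drop (k + 1)) (i + k + 1) (i + k + 1)
      (r.1 + 1, r.2)

-- [c] is a prefix of zs iff zs starts with c
lemma singleton_prefix_iff (c : Char) (zs : List Char) : [c] <+: zs ↔ zs.head? = some c := by
  cases zs with
  | nil => simp
  | cons z t => simp [List.cons_prefix_cons, eq_comm]

-- [c] occurs inside ys iff c is an element of ys
lemma singleton_infix_iff (c : Char) (ys : List Char) : [c] <:+: ys ↔ c ∈ ys := by
  constructor
  · rintro ⟨s, t, rfl⟩; simp
  · intro h
    obtain ⟨s, t, rfl⟩ := List.append_of_mem h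
    exact ⟨s, t, by simp⟩

-- Chars.find for a single character is the first index of that character
lemma find_singleton (ys : List Char) (c : Char) :
    PySem.Chars.find ys [c] = match ys.findIdx? (· == c) with
      | none => -1
      | some k => (k : Int) := by
  cases hf : ys.findIdx? (· == c) with
  | none =>
    simp only []
    rw [PySem.Chars.find_eq_neg_one_iff, singleton_infix_iff]
    rw [List.findIdx?_eq_none_iff] at hf
    intro hc; simpa using hf c hc
  | some k =>
    simp only []
    rw [List.findIdx?_eq_some_iff_getElem] at hf
    obtain ⟨hk, hck, hmin⟩ := hf
    have hmem : c ∈ ys := by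
      have := List.getElem_mem (l := ys) hk
      simp only [beq_iff_eq] at hck; rw [hck] at this; exact this
    have hpos : 0 ≤ PySem.Chars.find ys [c] := by
      rcases lt_or_eq_of_le (PySem.Chars.neg_one_le_find ys [c]) with h | h
      · omega
      · exfalso; rw [eq_comm, PySem.Chars.find_eq_neg_one_iff, singleton_infix_iff] at h; exact h hmem
    obtain ⟨hpre, hmin'⟩ := PySem.Chars.find_spec hpos
    rw [singleton_prefix_iff, List.head?_drop] at hpre
    have hle1 : (PySem.Chars.find ys [c]).toNat ≤ k := by
      by_contra hlt
      push Not at hlt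
      exact hmin' k hlt (by rw [singleton_prefix_iff, List.head?_drop]
                            simp only [beq_iff_eq] at hck
                            simp [List.getElem?_eq_getElem hk, hck])
    have hle2 : k ≤ (PySem.Chars.find ys [c]).toNat := by
      by_contra hlt
      push Not at hlt
      have := hmin _ hlt
      rw [List.getElem?_eq_some_iff] at hpre
      obtain ⟨h1, h2⟩ := hpre
      simp [h2] at this
    omega

-- b.find(c, counter) when c does not occur in b[counter:]
lemma findFrom_char_none (b : String) (c : Char) (counter : Nat) (h : counter ≤ b.toList.length)
    (hf : (b.toList.drop counter).findIdx? (· == c) = none) :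
    PySem.Str.findFrom b (String.ofList [c]) (↑counter) = -1 := by
  have hfs : PySem.Chars.find (b.toList.drop counter) [c] = -1 := by
    rw [find_singleton, hf]
  rw [PySem.Str.findFrom_eq, String.toList_ofList,
      PySem.Chars.findFrom_natCast b.toList [c] counter h, hfs]
  simp

-- b.find(c, counter) when the first occurrence of c in b[counter:] is at offset k
lemma findFrom_char_some (b : String) (c : Char) (counter k : Nat) (h : counter ≤ b.toList.length)
    (hf : (b.toList.drop counter).findIdx? (· == c) = some k) :
    PySem.Str.findFrom b (String.ofList [c]) (↑counter) = ((counter + k : Nat) : Int) := by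
  have hfs : PySem.Chars.find (b.toList.drop counter) [c] = (k : Int) := by
    rw [find_singleton, hf]
  rw [PySem.Str.findFrom_eq, String.toList_ofList,
      PySem.Chars.findFrom_natCast b.toList [c] counter h, hfs]
  rw [if_neg (by omega)]
  push_cast; ring

-- shifting the pointer into sub = dropping a prefix of sub
lemma alt_scan_shift (seg : List Char) : ∀ (sub : List Char) (i p last : Nat),
    alt_scan_go sub seg i p last =
      ((alt_scan_go (sub.drop p) seg i 0 last).1 + p, (alt_scan_go (sub.drop p) seg i 0 last).2) := by
  induction seg with
  | nil => intro sub i p last; simp [alt_scan_go]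
  | cons ch rest ih =>
    intro sub i p last
    have hidx : (sub.drop p)[0]? = sub[p]? := by
      simp [List.getElem?_drop]
    by_cases hc : sub[p]? = some ch
    · rw [alt_scan_go, if_pos (by simp [hc]), alt_scan_go, if_pos (by simp [hidx, hc])]
      rw [ih sub (i+1) (p+1) (i+1), ih (sub.drop p) (i+1) 1 (i+1), List.drop_drop]
      have hD : p + 1 = 1 + p := by omega
      rw [hD]
      simp only [Prod.mk.injEq]
      exact ⟨by omega, trivial⟩
    · rw [alt_scan_go, if_neg (by simp [hc]), alt_scan_go, if_neg (by simp [hidx, hc])]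
      rw [ih sub (i+1) p last]

-- B's scan computes the find-based greedy matcher
lemma alt_scan_eq_greedyF (seg : List Char) : ∀ (sub : List Char) (i last : Nat),
    alt_scan_go sub seg i 0 last = greedyF sub seg i last := by
  induction seg with
  | nil =>
    intro sub i last
    cases sub <;> simp [alt_scan_go, greedyF]
  | cons ch rest ih =>
    intro sub i last
    cases sub with
    | nil =>
      rw [alt_scan_go, if_neg (by simp), ih [] (i+1) last]
      simp [greedyF]
    | cons c cs =>
      by_cases hc : c = ch
      · subst hc
        rw [alt_scan_go, if_pos (by simp), alt_scan_shift rest (c :: cs) (i+1) 1 (i+1)]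
        simp only [List.drop_succ_cons, List.drop_zero]
        rw [ih cs (i+1) (i+1)]
        show _ = greedyF (c :: cs) (c :: rest) i last
        rw [greedyF]
        rw [List.findIdx?_cons]
        simp only [beq_self_eq_true, if_pos]
        simp
      · rw [alt_scan_go, if_neg (by simp; exact hc), ih (c :: cs) (i+1) last]
        show greedyF (c :: cs) rest (i+1) last = greedyF (c :: cs) (ch :: rest) i last
        rw [greedyF, greedyF, List.findIdx?_cons]
        have hne : (ch == c) = false := by simp; intro e; exact hc e.symm
        rw [hne]
        cases hf : rest.findIdx? (· == c) with
        | none => simp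
        | some k =>
          simp only [Option.map_some]
          have h1 : i + 1 + k + 1 = i + (k + 1) + 1 := by omega
          simp [h1]

-- the matched count does not depend on the index/last bookkeeping parameters
lemma greedyF_fst_ind : ∀ (sub seg : List Char) (i last i' last' : Nat),
    (greedyF sub seg i last).1 = (greedyF sub seg i' last').1 := by
  intro sub
  induction sub with
  | nil => intro seg i last i' last'; simp [greedyF]
  | cons c cs ih =>
    intro seg i last i' last'
    rw [greedyF, greedyF]
    cases seg.findIdx? (· == c) with
    | none => rfl
    | some k => simp only []; rw [ih (seg.drop (k+1)) (i+k+1) (i+k+1) (i'+k+1) (i'+k+1)]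

-- A's loop when no (further) mistake is allowed: a pure full-greedy-match test
lemma A_go_nomistake (b : String) (allow : Bool) :
    ∀ (rest : List Char) (counter : Nat) (sm : Int), counter ≤ b.toList.length →
    (allow && (sm == 0)) = false →
    search_algo_go b allow rest (↑counter) sm
      = ((greedyF rest (b.toList.drop counter) counter counter).1 == rest.length) := by
  intro rest
  induction rest with
  | nil => intro counter sm _ _; simp [search_algo_go, greedyF]
  | cons c cs ih =>
    intro counter sm hle hcond
    cases hf : (b.toList.drop counter).findIdx? (· == c) with
    | none =>
      rw [search_algo_go, findFrom_char_none b c counter hle hf]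
      rw [if_neg (by simp), if_neg (by simp [hcond])]
      rw [greedyF, hf]
      simp
    | some k =>
      have hk : k < b.toList.length - counter := by
        rw [List.findIdx?_eq_some_iff_getElem] at hf
        have := hf.1; simpa using this
      rw [search_algo_go, findFrom_char_some b c counter k hle hf]
      rw [if_pos (by omega)]
      have harg : ((counter + k : Nat) : Int) + 1 = ((counter + k + 1 : Nat) : Int) := by push_cast; ring
      rw [harg, ih (counter + k + 1) sm (by omega) hcond]
      rw [greedyF, hf]
      simp only [List.length_cons, List.drop_drop]
      have h1 : counter + (k + 1) = counter + k + 1 := by omega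
      rw [h1]
      simp

-- A's loop with the one mistake still available: greedy until the first stall, then
-- skip the stalled character and run the pure greedy test on the remainder
lemma A_go_mistake (b : String) :
    ∀ (rest : List Char) (counter : Nat), counter ≤ b.toList.length →
    search_algo_go b true rest (↑counter) 0
      = (if (greedyF rest (b.toList.drop counter) counter counter).1 = rest.length then true
         else ((greedyF (rest.drop ((greedyF rest (b.toList.drop counter) counter counter).1 + 1))
                  (b.toList.drop (greedyF rest (b.toList.drop counter) counter counter).2)
                  (greedyF rest (b.toList.drop counter) counter counter).2
                  (greedyF rest (b.toList.drop counter) counter counter).2).1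
               == rest.length - (greedyF rest (b.toList.drop counter) counter counter).1 - 1)) := by
  intro rest
  induction rest with
  | nil => intro counter _; simp [search_algo_go, greedyF]
  | cons c cs ih =>
    intro counter hle
    cases hf : (b.toList.drop counter).findIdx? (· == c) with
    | none =>
      rw [search_algo_go, findFrom_char_none b c counter hle hf]
      rw [if_neg (by simp), if_pos (by simp)]
      rw [A_go_nomistake b true cs counter 1 hle (by simp)]
      rw [greedyF, hf]
      simp only [List.length_cons, List.drop_succ_cons]
      rw [if_neg (by omega)]
      simp
    | some k =>
      have hk : k < b.toList.length - counter := by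
        rw [List.findIdx?_eq_some_iff_getElem] at hf
        have := hf.1; simpa using this
      rw [search_algo_go, findFrom_char_some b c counter k hle hf]
      rw [if_pos (by omega)]
      have harg : ((counter + k : Nat) : Int) + 1 = ((counter + k + 1 : Nat) : Int) := by push_cast; ring
      rw [harg, ih (counter + k + 1) (by omega)]
      rw [greedyF, hf]
      simp only [List.drop_drop]
      have h1 : counter + (k + 1) = counter + k + 1 := by omega
      rw [h1]
      set r := greedyF cs (b.toList.drop (counter + k + 1)) (counter + k + 1) (counter + k + 1) with hr
      simp only [List.length_cons, List.drop_succ_cons]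
      by_cases hm : r.1 = cs.length
      · rw [if_pos hm, if_pos (by omega)]
      · rw [if_neg hm, if_neg (by omega)]
        have h2 : cs.length + 1 - (r.1 + 1) - 1 = cs.length - r.1 - 1 := by omega
        rw [h2]

-- ===== VERDICT (by name: the statement is the Claim_ definition above) =====
theorem search_algo_spec : Claim_equal_search_algo := by
  intro a b _
  unfold Spec_search_algo search_algo search_algo_alt
  simp only []
  have hlen : PySem.Str.len a = (a.toList.length : Int) := by simp [PySem.Str.len_eq]
  have hscan1 : alt_scan_go a.toList b.toList 0 0 0 = greedyF a.toList b.toList 0 0 :=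
    alt_scan_eq_greedyF b.toList a.toList 0 0
  by_cases h3 : a.toList.length ≥ 3
  · have hallow : (if PySem.Str.len a ≥ 3 then true else false) = true := by
      rw [hlen]; rw [if_pos (by exact_mod_cast h3)]
    have hA := A_go_mistake b a.toList 0 (by omega)
    simp only [Nat.cast_zero, List.drop_zero] at hA
    rw [hallow, hA, hscan1]
    set r := greedyF a.toList b.toList 0 0 with hrdef
    by_cases hm : r.1 = a.toList.length
    · rw [if_pos hm, if_pos hm]
    · rw [if_neg hm, if_neg hm, if_neg (by omega)]
      rw [alt_scan_eq_greedyF]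
      rw [greedyF_fst_ind (a.toList.drop (r.1 + 1)) (b.toList.drop r.2) 0 0 r.2 r.2]
  · have hallow : (if PySem.Str.len a ≥ 3 then true else false) = false := by
      rw [hlen]; rw [if_neg (by omega)]
    have hA := A_go_nomistake b false a.toList 0 0 (by omega) (by simp)
    simp only [Nat.cast_zero, List.drop_zero] at hA
    rw [hallow, hA, hscan1]
    by_cases hm : (greedyF a.toList b.toList 0 0).1 = a.toList.length
    · rw [if_pos hm]; simp [hm]
    · rw [if_neg hm, if_pos (by omega)]
      simpa using hm
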